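-- pv_equiv track=rewrite | github.com/Creohex/advent-of-code-2018 | day05/alchemical-reduction.py | part_one
-- ===== SOURCE A (Python) =====
-- def part_one(input):
--     while True:
--         was_reduced = False
--         for i in range(len(input) - 1):
--             if abs(ord(input[i]) - ord(input[i + 1])) == 32:
--                 input = input[:i] + input[i + 2:]
--                 was_reduced = True
--                 break
--         if not was_reduced:
--             return len(input)
-- ===== SOURCE B (Python) =====
-- def part_one(input):
--     stack = []
--     for c in input:
--         if stack and abs(ord(stack[-1]) - ord(c)) == 32:
--             stack.pop()
--         else:
--             stack.append(c)
--     return len(stack)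
-- ===== Notes on version B (the rewrite author's own statement) =====
-- stated objective: alternative
-- what changed: Replaced the restart-from-scratch scan that deletes one reacting pair per full pass (with string slicing each time) by a single left-to-right pass over a stack that pops when the incoming character reacts with the stack top.
import Mathlib
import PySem

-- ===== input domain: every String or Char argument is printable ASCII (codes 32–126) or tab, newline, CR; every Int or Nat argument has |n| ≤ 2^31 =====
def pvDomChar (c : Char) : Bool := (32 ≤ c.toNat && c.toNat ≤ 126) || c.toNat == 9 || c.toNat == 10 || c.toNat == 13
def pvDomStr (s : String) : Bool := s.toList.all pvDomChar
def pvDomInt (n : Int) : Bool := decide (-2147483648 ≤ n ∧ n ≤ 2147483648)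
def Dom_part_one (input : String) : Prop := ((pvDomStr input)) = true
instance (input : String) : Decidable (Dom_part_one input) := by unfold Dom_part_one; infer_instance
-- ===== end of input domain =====

-- B replaces A's restart-after-each-deletion scan by a single stack pass (a different algorithm); return values proved equal.


-- ===== PORT A =====
-- abs(ord(x) - ord(y)) == 32
def pvReact (a b : Char) : Bool := ((a.toNat : Int) - (b.toNat : Int)).natAbs == 32

-- the inner 'for i in range(len(input) - 1)' scan: index of the first reacting pair
def pvFind : List Char → Option Nat
  | [] => none
  | [_] => none
  | a :: b :: rest =>
      if pvReact a b then some 0 else (pvFind (b :: rest)).map (· + 1)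

theorem pvFind_lt : ∀ (s : List Char) (i : Nat), pvFind s = some i → i + 2 ≤ s.length := by
  intro s
  induction s with
  | nil => intro i h; simp [pvFind] at h
  | cons a t ih =>
      intro i h
      cases t with
      | nil => simp [pvFind] at h
      | cons b rest =>
          simp only [pvFind] at h
          split at h
          · cases h; simp
          · rcases Option.map_eq_some_iff.mp h with ⟨j, hj, rfl⟩
            have := ih j hj
            simp at this ⊢
            omega

-- the outer 'while True' loop: delete the leftmost reacting pair, restart; return the length
def pvLoopA (s : List Char) : Nat :=
  match h : pvFind s with
  | none => s.length
  | some i => pvLoopA (s.take i ++ s.drop (i + 2))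
termination_by s.length
decreasing_by
  have := pvFind_lt s i h
  simp [List.length_take, List.length_drop]
  omega

def part_one (input : String) : Int := pvLoopA input.toList

-- ===== PORT B =====
-- one step of the stack loop: pop when the top reacts with the incoming char, else push
def pvStep (st : List Char) (c : Char) : List Char :=
  match st with
  | [] => [c]
  | t :: r => if pvReact t c then r else c :: t :: r

def part_one_alt (input : String) : Int := (input.toList.foldl pvStep []).length

-- ===== PRECONDITION & SPEC =====
def Spec_part_one (input : String) (out : Int) : Prop := out = part_one_alt input
instance (input : String) (out : Int) : Decidable (Spec_part_one input out) := by unfold Spec_part_one; infer_instance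

-- ===== CLAIM (what is proved, stated in full; the proofs are below) =====
def Claim_equal_part_one : Prop := ∀ (input : String), Dom_part_one input → Spec_part_one input (part_one input)

-- ===== LEMMAS AND PROOFS =====

theorem pvFind_cons_none {a b : Char} {l : List Char} :
    pvFind (a :: b :: l) = none ↔ pvReact a b = false ∧ pvFind (b :: l) = none := by
  simp only [pvFind]
  split <;> rename_i hr
  · simp [hr]
  · simp [Bool.eq_false_iff.mpr hr, Option.map_eq_none_iff]

-- running the stack over a list with no adjacent reacting pair just reverses it onto the stack
theorem run_eager : ∀ (u : List Char) (t : Char) (r : List Char),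
    pvFind (t :: u) = none → u.foldl pvStep (t :: r) = u.reverse ++ t :: r := by
  intro u
  induction u with
  | nil => intro t r _; simp
  | cons c u' ih =>
      intro t r h
      rcases pvFind_cons_none.mp h with ⟨hr, h'⟩
      simp only [List.foldl_cons, pvStep, hr]
      rw [if_neg (by simp)]
      rw [ih c (t :: r) h']
      simp

theorem run_empty (u : List Char) (h : pvFind u = none) :
    u.foldl pvStep [] = u.reverse := by
  cases u with
  | nil => simp
  | cons c u' =>
      show List.foldl pvStep [c] u' = (c :: u').reverse
      rw [run_eager u' c [] h]
      simp

theorem pvFind_append_none {u : List Char} {a : Char} (h : pvFind (u ++ [a]) = none) :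
    pvFind u = none := by
  induction u with
  | nil => rfl
  | cons x t ih =>
      cases t with
      | nil => rfl
      | cons y l =>
          rcases pvFind_cons_none.mp h with ⟨hr, h'⟩
          exact pvFind_cons_none.mpr ⟨hr, ih h'⟩

-- deleting the leftmost reacting pair does not change the final stack
theorem reactRemove (u : List Char) (a b : Char) (v : List Char)
    (hab : pvReact a b = true) (hu : pvFind (u ++ [a]) = none) :
    (u ++ a :: b :: v).foldl pvStep [] = (u ++ v).foldl pvStep [] := by
  have hu' : pvFind u = none := pvFind_append_none hu
  have h1 : (u ++ [a]).foldl pvStep [] = a :: u.reverse := by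
    rw [run_empty _ hu]; simp
  calc (u ++ a :: b :: v).foldl pvStep []
      = ((u ++ [a]) ++ b :: v).foldl pvStep [] := by simp
    _ = (b :: v).foldl pvStep ((u ++ [a]).foldl pvStep []) := by rw [List.foldl_append]
    _ = (b :: v).foldl pvStep (a :: u.reverse) := by rw [h1]
    _ = v.foldl pvStep u.reverse := by simp [List.foldl_cons, pvStep, hab]
    _ = v.foldl pvStep (u.foldl pvStep []) := by rw [run_empty _ hu']
    _ = (u ++ v).foldl pvStep [] := by rw [List.foldl_append]

-- pvFind s = some i decomposes s around its leftmost reacting pair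
theorem pvFind_some_decomp : ∀ (s : List Char) (i : Nat), pvFind s = some i →
    ∃ u a b v, s = u ++ a :: b :: v ∧ u.length = i ∧ pvReact a b = true ∧
      pvFind (u ++ [a]) = none := by
  intro s
  induction s with
  | nil => intro i h; simp [pvFind] at h
  | cons x t ih =>
      intro i h
      cases t with
      | nil => simp [pvFind] at h
      | cons y l =>
          simp only [pvFind] at h
          split at h <;> rename_i hr
          · cases h
            exact ⟨[], x, y, l, by simp, rfl, hr, rfl⟩
          · rcases Option.map_eq_some_iff.mp h with ⟨j, hj, rfl⟩
            rcases ih j hj with ⟨u, a, b, v, hs, hlen, hab, hnone⟩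
            refine ⟨x :: u, a, b, v, by simp [hs], by simp [hlen], hab, ?_⟩
            cases u with
            | nil =>
                simp at hs
                exact pvFind_cons_none.mpr ⟨Bool.eq_false_iff.mpr (by simpa [hs.1] using hr), rfl⟩
            | cons c u' =>
                simp at hs
                refine pvFind_cons_none.mpr ⟨Bool.eq_false_iff.mpr (by simpa [hs.1] using hr), ?_⟩
                simpa [hs.1] using hnone

theorem loopA_eq_stack : ∀ (s : List Char), pvLoopA s = (s.foldl pvStep []).length := by
  intro s
  induction s using pvLoopA.induct with
  | case1 s h =>
      rw [pvLoopA]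
      split <;> rename_i heq
      · rw [run_empty s h, List.length_reverse]
      · rw [h] at heq; cases heq
  | case2 s i h ih =>
      rw [pvLoopA]
      split <;> rename_i heq
      · rw [h] at heq; cases heq
      rename_i j
      rw [h] at heq
      cases heq
      rcases pvFind_some_decomp s i h with ⟨u, a, b, v, hs, hlen, hab, hnone⟩
      have htake : s.take i = u := by
        rw [hs, ← hlen, List.take_left]
      have hdrop : s.drop (i + 2) = v := by
        rw [hs, ← hlen]
        rw [show u.length + 2 = (u ++ [a, b]).length by simp]
        rw [show u ++ a :: b :: v = (u ++ [a, b]) ++ v by simp]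
        exact List.drop_left
      rw [htake, hdrop] at ih ⊢
      rw [ih, hs, reactRemove u a b v hab hnone]

-- ===== VERDICT (by name: the statement is the Claim_ definition above) =====
theorem part_one_spec : Claim_equal_part_one := by
  intro input _
  unfold Spec_part_one part_one part_one_alt
  rw [loopA_eq_stack]
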